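-- pv_equiv track=rewrite | github.com/jordansquire/adventofcode | 2024/day4/day4.py | transpose_diagonally
-- ===== SOURCE A (Python) =====
-- def transpose_diagonally(matrix, reverse=False):
--     """Rotates a list of lists by 45 degrees"""
--
--     rows = len(matrix)
--     cols = len(matrix[0])
--
--     # Create a new matrix to store the rotated elements
--     rotated = [[' ' for _ in range(rows + cols - 1)] for _ in range(rows + cols - 1)]
--
--     # Fill the new matrix with rotated elements
--     for i in range(rows):
--         for j in range(cols):
--             if reverse:
--                 rotated[i + j][cols - 1 - j + i] = matrix[i][cols - 1 - j]
--             else: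
--                 rotated[i + j][cols - 1 - j + i] = matrix[i][j]
--
--     # Remove empty rows and columns
--     result = [row for row in rotated if any(x != ' ' for x in row)]
--     result = [[x for x in row if x != ' '] for row in result]
--
--     return result
-- ===== SOURCE B (Python) =====
-- def transpose_diagonally(matrix, reverse=False):
--     """Rotates a list of lists by 45 degrees"""
--     rows = len(matrix)
--     cols = len(matrix[0])
--     diags = [[] for _ in range(rows + cols - 1)]
--     for i in range(rows):
--         row = matrix[i]
--         for j in range(cols):
--             v = row[cols - 1 - j] if reverse else row[j]
--             if v != ' ':
--                 diags[i + j].append(v)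
--     return [d for d in diags if d]
-- ===== Notes on version B (the rewrite author's own statement) =====
-- stated objective: faster
-- what changed: B appends each non-blank cell directly to its diagonal bucket in one pass over the r x c matrix and drops empty buckets, instead of writing into an (r+c-1)^2 space-padded grid and then filtering the padding back out.
import Mathlib
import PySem

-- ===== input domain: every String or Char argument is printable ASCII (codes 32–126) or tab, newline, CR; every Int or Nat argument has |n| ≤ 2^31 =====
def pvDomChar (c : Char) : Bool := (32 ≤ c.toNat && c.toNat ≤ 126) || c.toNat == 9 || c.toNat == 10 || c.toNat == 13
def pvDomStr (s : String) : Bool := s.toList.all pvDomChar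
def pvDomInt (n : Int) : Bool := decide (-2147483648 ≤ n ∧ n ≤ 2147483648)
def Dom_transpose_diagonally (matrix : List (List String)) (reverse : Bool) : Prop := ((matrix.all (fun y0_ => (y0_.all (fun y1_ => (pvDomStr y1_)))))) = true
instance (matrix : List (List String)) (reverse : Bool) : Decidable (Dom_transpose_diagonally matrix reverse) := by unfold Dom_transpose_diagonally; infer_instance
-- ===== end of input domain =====

-- B appends each non-blank cell directly to its diagonal bucket in ONE pass over the r x c
-- matrix and drops empty buckets, instead of filling and then filtering an (r+c-1)^2
-- space-padded grid (objective: faster).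


-- ===== PORT A =====
-- rotated[a][b] = v (indices are always in range on admitted inputs; List.set is exact there)
def pvSetAt (m : List (List String)) (a b : Nat) (v : String) : List (List String) :=
  m.set a ((m.getD a []).set b v)

def transpose_diagonally (matrix : List (List String)) (reverse : Bool) : List (List String) :=
  let rows := matrix.length
  let cols := (matrix.headD []).length
  let rotated := List.replicate (rows + cols - 1) (List.replicate (rows + cols - 1) " ")
  let rotated := (List.range rows).foldl (fun rot i =>
    (List.range cols).foldl (fun rot j =>
      pvSetAt rot (i + j) (cols - 1 - j + i)
        (if reverse then (matrix.getD i []).getD (cols - 1 - j) " "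
         else (matrix.getD i []).getD j " ")) rot) rotated
  let result := rotated.filter (fun row => row.any (fun x => x != " "))
  result.map (fun row => row.filter (fun x => x != " "))

-- ===== PORT B =====
def transpose_diagonally_alt (matrix : List (List String)) (reverse : Bool) : List (List String) :=
  let rows := matrix.length
  let cols := (matrix.headD []).length
  let diags := (List.range rows).foldl (fun diags i =>
    (List.range cols).foldl (fun diags j =>
      let v := if reverse then (matrix.getD i []).getD (cols - 1 - j) " "
               else (matrix.getD i []).getD j " "
      if v != " " then diags.modify (i + j) (fun d => d ++ [v]) else diags) diags)
    (List.replicate (rows + cols - 1) [])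
  diags.filter (fun d => !d.isEmpty)

-- ===== PRECONDITION & SPEC =====
-- Pre_ excludes exactly the inputs where the Python A raises IndexError:
-- the empty matrix (matrix[0]) and matrices with a row shorter than the first row.
def Pre_transpose_diagonally (matrix : List (List String)) (reverse : Bool) : Prop :=
  matrix ≠ [] ∧ ∀ row ∈ matrix, (matrix.headD []).length ≤ row.length
instance (matrix : List (List String)) (reverse : Bool) : Decidable (Pre_transpose_diagonally matrix reverse) := by unfold Pre_transpose_diagonally; infer_instance
def pvWitness_transpose_diagonally : List (List String) × Bool := ([["a", "b"], ["c", "d"]], false)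

def Spec_transpose_diagonally (matrix : List (List String)) (reverse : Bool) (out : List (List String)) : Prop := out = transpose_diagonally_alt matrix reverse
instance (matrix : List (List String)) (reverse : Bool) (out : List (List String)) : Decidable (Spec_transpose_diagonally matrix reverse out) := by unfold Spec_transpose_diagonally; infer_instance

-- ===== CLAIM (what is proved, stated in full; the proofs are below) =====
def Claim_equal_transpose_diagonally : Prop := ∀ (matrix : List (List String)) (reverse : Bool), Dom_transpose_diagonally matrix reverse → Pre_transpose_diagonally matrix reverse → Spec_transpose_diagonally matrix reverse (transpose_diagonally matrix reverse)

-- ===== LEMMAS AND PROOFS =====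

-- generic fold-of-modifies over range: the j-th step modifies index i+j, so index d is
-- touched exactly once, when j = d - i
lemma pvFoldModify {a : Type} (g : Nat → a → a) (i k : Nat) (st : List a) (d : Nat) :
    ((List.range k).foldl (fun st j => st.modify (i + j) (g j)) st)[d]? =
      if i ≤ d ∧ d < i + k then (st[d]?).map (g (d - i)) else st[d]? := by
  induction k with
  | zero => rw [List.range_zero, List.foldl_nil, if_neg (by omega)]
  | succ k ih =>
    rw [List.range_succ, List.foldl_append, List.foldl_cons, List.foldl_nil,
      List.getElem?_modify, ih]
    by_cases hd : i + k = d
    · rw [if_neg (by omega), if_pos (by omega)]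
      have : d - i = k := by omega
      subst this
      cases st[d]? <;> simp [hd]
    · by_cases hw : i ≤ d ∧ d < i + k
      · rw [if_pos hw, if_pos (by omega)]
        cases st[d]? <;> simp [hd]
      · rw [if_neg hw, if_neg (by omega)]
        cases st[d]? <;> simp [hd]

lemma pvFoldModify_length {a : Type} (g : Nat → a → a) (i k : Nat) (st : List a) :
    ((List.range k).foldl (fun st j => st.modify (i + j) (g j)) st).length = st.length := by
  induction k with
  | zero => rw [List.range_zero, List.foldl_nil]
  | succ k ih =>
    rw [List.range_succ, List.foldl_append, List.foldl_cons, List.foldl_nil,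
      List.length_modify, ih]

lemma pvFoldModify_getD {a : Type} (g : Nat → a → a) (i k : Nat) (st : List a) (d : Nat)
    (dflt : a) (hd : d < st.length) :
    ((List.range k).foldl (fun st j => st.modify (i + j) (g j)) st).getD d dflt =
      if i ≤ d ∧ d < i + k then g (d - i) (st.getD d dflt) else st.getD d dflt := by
  rw [List.getD_eq_getElem?_getD, pvFoldModify, List.getD_eq_getElem?_getD,
    List.getElem?_eq_getElem hd]
  split_ifs <;> simp

lemma pvSetAt_eq_modify (m : List (List String)) (a b : Nat) (x : String) :
    pvSetAt m a b x = m.modify a (fun r => r.set b x) := by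
  apply List.ext_getElem?
  intro d
  rw [pvSetAt, List.getElem?_set, List.getElem?_modify]
  by_cases hd : a = d
  · subst hd
    by_cases ha : a < m.length
    · rw [if_pos rfl, if_pos ha, List.getElem?_eq_getElem ha,
        List.getD_eq_getElem m [] ha]
      simp
    · rw [if_pos rfl, if_neg ha, List.getElem?_eq_none (by omega)]
      simp
  · rw [if_neg hd]
    cases m[d]? <;> simp [hd]

lemma pvIfModify {a : Type} (c : Prop) [Decidable c] (st : List a) (k : Nat) (f : a → a) :
    (if c then st.modify k f else st) = st.modify k (fun r => if c then f r else r) := by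
  by_cases hc : c
  · rw [if_pos hc]
    congr 1
    funext r
    rw [if_pos hc]
  · rw [if_neg hc]
    apply List.ext_getElem?
    intro j
    rw [List.getElem?_modify]
    cases st[j]? <;> simp [hc]

lemma pvGetD_set_ne (l : List String) (p q : Nat) (x : String) (dflt : String) (h : p ≠ q) :
    (l.set p x).getD q dflt = l.getD q dflt := by
  rw [List.getD_eq_getElem?_getD, List.getD_eq_getElem?_getD, List.getElem?_set, if_neg h]

lemma pvGetD_all {a : Type} (l : List a) (x : a) (p : Nat) (h : ∀ y ∈ l, y = x) :
    l.getD p x = x := by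
  rw [List.getD_eq_getElem?_getD]
  cases hq : l[p]? with
  | none => rfl
  | some y => exact h y (List.mem_of_getElem? hq)

lemma pvSetSame (l : List String) (p : Nat) (x : String) (h : l.getD p x = x) :
    l.set p x = l := by
  apply List.ext_getElem?
  intro j
  rw [List.getElem?_set]
  by_cases hj : p = j
  · subst hj
    by_cases hl : p < l.length
    · rw [if_pos rfl, if_pos hl, List.getElem?_eq_getElem hl]
      rw [List.getD_eq_getElem _ _ hl] at h
      rw [h]
    · rw [if_pos rfl, if_neg hl, List.getElem?_eq_none (by omega)]
  · rw [if_neg hj]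

lemma pvDropAll (l : List String) (p : Nat) (h : ∀ q, p ≤ q → l.getD q " " = " ") :
    ∀ y ∈ l.drop p, y = " " := by
  intro y hy
  obtain ⟨t, ht, rfl⟩ := List.mem_iff_getElem.mp hy
  rw [List.getElem_drop]
  have hlen : p + t < l.length := by
    have := List.length_drop (l := l) (i := p); omega
  rw [← List.getD_eq_getElem l " " hlen]
  exact h (p + t) (by omega)

-- replacing the first cell of the all-blank suffix by a non-blank value appends it
-- to the filtered row
lemma pvFilterSet (l : List String) (p : Nat) (x : String) (hp : p < l.length)
    (hx : x ≠ " ") (hsp : ∀ q, p ≤ q → l.getD q " " = " ") :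
    (l.set p x).filter (fun y => y != " ") = l.filter (fun y => y != " ") ++ [x] := by
  have hdropP : (l.drop p).filter (fun y => y != " ") = [] := by
    rw [List.filter_eq_nil_iff]
    intro y hy
    simp [pvDropAll l p hsp y hy]
  have hdropP1 : (l.drop (p + 1)).filter (fun y => y != " ") = [] := by
    rw [List.filter_eq_nil_iff]
    intro y hy
    have : y ∈ l.drop p := by
      have := List.drop_drop (i := 1) (j := p) (l := l)
      rw [← this] at hy
      exact List.mem_of_mem_drop hy
    simp [pvDropAll l p hsp y this]
  have hfl : l.filter (fun y => y != " ") = (l.take p).filter (fun y => y != " ") := by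
    conv_lhs => rw [← List.take_append_drop p l]
    rw [List.filter_append, hdropP, List.append_nil]
  rw [List.set_eq_take_append_cons_drop, if_pos hp, List.filter_append, List.filter_cons,
    if_pos (by simp [hx]), hdropP1, hfl]

-- both ports' fill loops, over an abstract cell-value function v i j
def pvRotFold (v : Nat → Nat → String) (cols N k : Nat) : List (List String) :=
  (List.range k).foldl (fun rot i => (List.range cols).foldl
      (fun rot j => pvSetAt rot (i + j) (cols - 1 - j + i) (v i j)) rot)
    (List.replicate N (List.replicate N " "))

def pvDgFold (v : Nat → Nat → String) (cols N k : Nat) : List (List String) :=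
  (List.range k).foldl (fun dg i => (List.range cols).foldl
      (fun dg j => if v i j != " " then dg.modify (i + j) (fun r => r ++ [v i j]) else dg) dg)
    (List.replicate N [])

lemma pvRotFold_succ (v : Nat → Nat → String) (cols N k : Nat) :
    pvRotFold v cols N (k + 1) = (List.range cols).foldl
      (fun rot j => rot.modify (k + j) (fun r => r.set (cols - 1 - j + k) (v k j)))
      (pvRotFold v cols N k) := by
  rw [pvRotFold, pvRotFold, List.range_succ, List.foldl_append, List.foldl_cons,
    List.foldl_nil]
  simp only [pvSetAt_eq_modify]

lemma pvDgFold_succ (v : Nat → Nat → String) (cols N k : Nat) :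
    pvDgFold v cols N (k + 1) = (List.range cols).foldl
      (fun dg j => dg.modify (k + j)
        (fun r => if (v k j != " ") = true then r ++ [v k j] else r))
      (pvDgFold v cols N k) := by
  rw [pvDgFold, pvDgFold, List.range_succ, List.foldl_append, List.foldl_cons,
    List.foldl_nil]
  simp only [pvIfModify]

-- the loop invariant after k of the `rows` outer iterations: lengths are stable, each
-- grid row filtered to its non-blanks IS the bucket, and positions at or beyond the
-- write frontier cols-1-d+2k of grid row d are still blank
theorem pvInv (v : Nat → Nat → String) (rows cols : Nat)
    (k : Nat) (hk : k ≤ rows) :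
    (pvRotFold v cols (rows + cols - 1) k).length = rows + cols - 1 ∧
    (pvDgFold v cols (rows + cols - 1) k).length = rows + cols - 1 ∧
    (∀ d, d < rows + cols - 1 →
      ((pvRotFold v cols (rows + cols - 1) k).getD d []).length = rows + cols - 1) ∧
    (∀ d, d < rows + cols - 1 →
      ((pvRotFold v cols (rows + cols - 1) k).getD d []).filter (fun y => y != " ") =
        (pvDgFold v cols (rows + cols - 1) k).getD d []) ∧
    (∀ d, d < rows + cols - 1 → ∀ p, cols + 2 * k ≤ p + d + 1 →
      ((pvRotFold v cols (rows + cols - 1) k).getD d []).getD p " " = " ") := by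
  induction k with
  | zero =>
    refine ⟨by simp [pvRotFold], by simp [pvDgFold], ?_, ?_, ?_⟩
    · intro d hd
      rw [pvRotFold, List.range_zero, List.foldl_nil,
        List.getD_eq_getElem _ _ (by simpa using hd), List.getElem_replicate]
      simp
    · intro d hd
      rw [pvRotFold, pvDgFold, List.range_zero, List.foldl_nil, List.foldl_nil,
        List.getD_eq_getElem _ _ (by simpa using hd), List.getElem_replicate,
        List.getD_eq_getElem _ _ (by simpa using hd), List.getElem_replicate,
        List.filter_replicate]
      simp
    · intro d hd p hp
      have hrep : (List.replicate (rows + cols - 1)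
          (List.replicate (rows + cols - 1) " ")).getD d [] =
          List.replicate (rows + cols - 1) " " := by
        rw [List.getD_eq_getElem _ _ (by simpa using hd), List.getElem_replicate]
      rw [pvRotFold, List.range_zero, List.foldl_nil, hrep]
      exact pvGetD_all _ _ _ (fun y hy => (List.eq_of_mem_replicate hy))
  | succ k ih =>
    have hk' : k ≤ rows := by omega
    have hkr : k < rows := by omega
    obtain ⟨L1, L2, L3, L4, L5⟩ := ih hk'
    have hRgetD := fun d (hd : d < rows + cols - 1) =>
      pvFoldModify_getD (fun j r => r.set (cols - 1 - j + k) (v k j)) k cols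
        (pvRotFold v cols (rows + cols - 1) k) d [] (by omega)
    have hDgetD := fun d (hd : d < rows + cols - 1) =>
      pvFoldModify_getD (fun j r => if (v k j != " ") = true then r ++ [v k j] else r)
        k cols (pvDgFold v cols (rows + cols - 1) k) d [] (by omega)
    simp only at hRgetD hDgetD
    refine ⟨?_, ?_, ?_, ?_, ?_⟩
    · rw [pvRotFold_succ, pvFoldModify_length]; exact L1
    · rw [pvDgFold_succ, pvFoldModify_length]; exact L2
    · intro d hd
      rw [pvRotFold_succ, hRgetD d hd]
      split_ifs with hw
      · rw [List.length_set]; exact L3 d hd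
      · exact L3 d hd
    · intro d hd
      rw [pvRotFold_succ, pvDgFold_succ, hRgetD d hd, hDgetD d hd]
      by_cases hw : k ≤ d ∧ d < k + cols
      · rw [if_pos hw, if_pos hw]
        obtain ⟨hw1, hw2⟩ := hw
        by_cases hbl : (v k (d - k) != " ") = true
        · rw [if_pos hbl,
            pvFilterSet _ _ _ (by rw [L3 d hd]; omega) (by simpa using hbl)
              (fun q hq => L5 d hd q (by omega)),
            L4 d hd]
        · rw [if_neg hbl]
          have hveq : v k (d - k) = " " := by
            simpa using hbl
          rw [hveq, pvSetSame _ _ _ (L5 d hd (cols - 1 - (d - k) + k) (by omega))]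
          exact L4 d hd
      · rw [if_neg hw, if_neg hw]
        exact L4 d hd
    · intro d hd p hp
      rw [pvRotFold_succ, hRgetD d hd]
      split_ifs with hw
      · obtain ⟨hw1, hw2⟩ := hw
        rw [pvGetD_set_ne _ _ _ _ _ (by omega)]
        exact L5 d hd p (by omega)
      · exact L5 d hd p (by omega)

lemma pvFilterMap {a b : Type} (f : a → b) (p : b → Bool) (l : List a) :
    (l.filter (fun x => p (f x))).map f = (l.map f).filter p := by
  induction l with
  | nil => rfl
  | cons x xs ih =>
    rw [List.map_cons, List.filter_cons, List.filter_cons]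
    by_cases hx : p (f x) = true
    · rw [if_pos hx, if_pos hx, List.map_cons, ih]
    · rw [if_neg hx, if_neg hx, ih]

lemma pvAnyIsEmpty (row : List String) :
    (row.any (fun x => x != " ")) = !(row.filter (fun x => x != " ")).isEmpty := by
  rw [Bool.eq_iff_iff]
  simp [List.any_eq_true, List.isEmpty_iff, List.filter_eq_nil_iff]

-- the two ports agree (on every input; Pre_ only mirrors where the Python A raises)
lemma pvAgree (matrix : List (List String)) (reverse : Bool) :
    transpose_diagonally matrix reverse = transpose_diagonally_alt matrix reverse := by
  set cols := (matrix.headD []).length with hcols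
  set rows := matrix.length with hrows
  set v : Nat → Nat → String := fun i j =>
    if reverse then (matrix.getD i []).getD (cols - 1 - j) " "
    else (matrix.getD i []).getD j " " with hv
  have hA : transpose_diagonally matrix reverse =
      ((pvRotFold v cols (rows + cols - 1) rows).filter
        (fun row => row.any (fun x => x != " "))).map
        (fun row => row.filter (fun x => x != " ")) := rfl
  have hB : transpose_diagonally_alt matrix reverse =
      (pvDgFold v cols (rows + cols - 1) rows).filter (fun d => !d.isEmpty) := rfl
  rw [hA, hB]
  obtain ⟨L1, L2, L3, L4, L5⟩ := pvInv v rows cols rows le_rfl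
  have hmap : (pvRotFold v cols (rows + cols - 1) rows).map
      (fun row => row.filter (fun x => x != " ")) =
      pvDgFold v cols (rows + cols - 1) rows := by
    apply List.ext_getElem
    · rw [List.length_map, L1, L2]
    · intro d h1 h2
      rw [List.getElem_map]
      rw [List.length_map, L1] at h1
      rw [L2] at h2
      rw [← List.getD_eq_getElem _ [] (by omega), ← List.getD_eq_getElem _ [] (by omega)]
      exact L4 d (by omega)
  simp only [pvAnyIsEmpty]
  have hfm := pvFilterMap (fun row : List String => row.filter (fun x => x != " "))
    (fun r => !r.isEmpty) (pvRotFold v cols (rows + cols - 1) rows)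
  simp only at hfm
  rw [hfm, hmap]

-- ===== VERDICT (by name: the statement is the Claim_ definition above) =====
theorem transpose_diagonally_spec : Claim_equal_transpose_diagonally := by
  intro matrix reverse hDom hPre
  unfold Spec_transpose_diagonally
  exact pvAgree matrix reverse
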